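-- pv_equiv track=rewrite | github.com/rigizer/algorithm | 백준/Gold/13549. 숨바꼭질 3/숨바꼭질 3.py | bfs
-- ===== SOURCE A (Python) =====
-- from collections import deque
--
-- def bfs(n, k):
--     queue = deque()
--     visited = [1e9] * 100_001
--
--     queue.append((n, 0))
--     visited[n] = 0
--
--     while queue:
--         nx, nt = queue.popleft()
--
--         if nx == k:
--             return nt
--
--         # 수빈이가 순간이동 할 때
--         x = nx * 2
--         if is_move(x, nt, visited):
--             queue.append((x, nt))
--             visited[x] = nt
--
--         # 수빈이가 걸어갈 때
--         for dx in [-1, 1]: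
--             x = nx + dx
--             if is_move(x, nt + 1, visited):
--                 queue.append((x, nt + 1))
--                 visited[x] = nt + 1
--
-- def is_move(x, t, visited):
--     if 0 <= x <= 100_000 and t < visited[x]:
--         return True
-- ===== SOURCE B (Python) =====
-- def bfs(n, k):
--     visited = [10 ** 9] * 100001
--     visited[n] = 0
--     frontier = [(n, 0)]
--     while frontier:
--         for x, t in frontier:
--             if x == k:
--                 return t
--         nxt = []
--         for x, t in frontier:
--             for y, ty in ((x * 2, t), (x - 1, t + 1), (x + 1, t + 1)):
--                 if 0 <= y <= 100000 and ty < visited[y]: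
--                     visited[y] = ty
--                     nxt.append((y, ty))
--         frontier = nxt
-- ===== Notes on version B (the rewrite author's own statement) =====
-- stated objective: alternative
-- what changed: Replaces A's element-by-element deque loop (pop one node, test it against k, relax its three moves into the shared queue) with a level-synchronous BFS: each frontier layer is first scanned for the target and then expanded wholesale into the next frontier list, so there is no deque and no interleaving of goal-test and expansion.
import Mathlib
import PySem

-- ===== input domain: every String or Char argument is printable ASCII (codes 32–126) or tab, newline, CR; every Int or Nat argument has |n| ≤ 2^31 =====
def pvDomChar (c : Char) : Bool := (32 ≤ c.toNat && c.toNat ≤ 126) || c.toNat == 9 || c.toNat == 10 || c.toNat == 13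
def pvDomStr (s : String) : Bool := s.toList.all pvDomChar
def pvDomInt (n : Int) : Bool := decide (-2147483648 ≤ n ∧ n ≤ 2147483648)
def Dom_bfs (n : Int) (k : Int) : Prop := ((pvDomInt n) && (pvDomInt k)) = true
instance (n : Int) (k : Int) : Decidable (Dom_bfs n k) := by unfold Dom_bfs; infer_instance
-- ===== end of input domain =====

set_option maxRecDepth 4000


-- B is a level-synchronous BFS (scan each layer for the target, then expand the whole
-- layer) instead of A's element-by-element deque loop; same return value, alternative
-- structure (no measured speed claim).
-- Python's `1e9` sentinel is modelled exactly by the integer 10^9: every time value the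
-- programs compare against it is a small nonnegative integer, so the comparisons agree.
-- Both ports guard the loops with a fuel counter (10^16); the proofs show via a
-- decreasing measure that the fuel is never exhausted.

-- ===== PORT A =====
-- Python index semantics for `visited[n] = 0` on a list of length `m`
-- (negative index counts from the end; none = IndexError): exact.
def pvIdx (m : Nat) (i : Int) : Option Nat :=
  if 0 ≤ i then (if i < (m : Int) then some i.toNat else none)
  else (if 0 ≤ i + (m : Int) then some (i + (m : Int)).toNat else none)

-- `visited[x] = t`, used only under the in-range guard of `is_move`: exact there.
def setv (vis : Array Int) (x t : Int) : Array Int := vis.setIfInBounds x.toNat t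

-- is_move(x, t, visited): `0 <= x <= 100_000 and t < visited[x]`
def isMove (x t : Int) (visited : Array Int) : Bool :=
  decide (0 ≤ x) && decide (x ≤ 100000) && decide (t < visited.getD x.toNat 0)

-- the `while queue:` loop; the deque is the array `q` with head pointer `i`
def goA (k : Int) : Nat → Array (Int × Int) → Nat → Array Int → Option Int
  | 0, _, _, _ => none
  | f + 1, q, i, vis =>
    if h : i < q.size then
      let nx := (q[i]).1
      let nt := (q[i]).2
      if nx = k then some nt
      else
        -- teleport: x = nx * 2
        let s0 : Array (Int × Int) × Array Int :=
          if isMove (nx * 2) nt vis then (q.push (nx * 2, nt), setv vis (nx * 2) nt)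
          else (q, vis)
        -- walk: for dx in [-1, 1]
        let s1 := [(-1 : Int), 1].foldl (fun s dx =>
          if isMove (nx + dx) (nt + 1) s.2 then (s.1.push (nx + dx, nt + 1), setv s.2 (nx + dx) (nt + 1))
          else s) s0
        goA k f s1.1 (i + 1) s1.2
    else none

def bfs (n : Int) (k : Int) : Option Int :=
  match pvIdx 100001 n with
  | none => none   -- Python raises IndexError here (outside Pre_bfs)
  | some i =>
    goA k (10 ^ 16) #[(n, 0)] 0 ((Array.replicate 100001 ((10 : Int) ^ 9)).setIfInBounds i 0)

-- ===== PORT B =====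
-- the neighbour tuple ((x*2, t), (x-1, t+1), (x+1, t+1)) of Source B
def cands (x t : Int) : List (Int × Int) := [(x * 2, t), (x - 1, t + 1), (x + 1, t + 1)]

-- `for x, t in frontier: if x == k: return t`
def scanB (k : Int) : List (Int × Int) → Option Int
  | [] => none
  | p :: r => if p.1 = k then some p.2 else scanB k r

-- body of the inner `for y, ty in (...)` loop
def stepB (s : Array Int × Array (Int × Int)) (c : Int × Int) : Array Int × Array (Int × Int) :=
  if isMove c.1 c.2 s.1 then (setv s.1 c.1 c.2, s.2.push c) else s

def nodeB (s : Array Int × Array (Int × Int)) (p : Int × Int) : Array Int × Array (Int × Int) :=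
  (cands p.1 p.2).foldl stepB s

-- the `while frontier:` loop
def goB (k : Int) : Nat → List (Int × Int) → Array Int → Option Int
  | _, [], _ => none
  | 0, _, _ => none
  | f + 1, front, vis =>
    match scanB k front with
    | some t => some t
    | none =>
      let s := front.foldl nodeB (vis, #[])
      goB k f s.2.toList s.1

def bfs_alt (n : Int) (k : Int) : Option Int :=
  match pvIdx 100001 n with
  | none => none
  | some i =>
    goB k (10 ^ 16) [(n, 0)] ((Array.replicate 100001 ((10 : Int) ^ 9)).setIfInBounds i 0)

-- ===== PRECONDITION & SPEC =====
-- Pre_ excludes exactly the inputs where Python A raises IndexError at `visited[n] = 0`.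
def Pre_bfs (n : Int) (k : Int) : Prop := -100001 ≤ n ∧ n ≤ 100000
instance (n : Int) (k : Int) : Decidable (Pre_bfs n k) := by unfold Pre_bfs; infer_instance
def pvWitness_bfs : Int × Int := (5, 14)
def Spec_bfs (n : Int) (k : Int) (out : Option Int) : Prop := out = bfs_alt n k
instance (n : Int) (k : Int) (out : Option Int) : Decidable (Spec_bfs n k out) := by unfold Spec_bfs; infer_instance

-- ===== CLAIM (what is proved, stated in full; the proofs are below) =====
def Claim_equal_bfs : Prop := ∀ (n : Int) (k : Int), Dom_bfs n k → Pre_bfs n k → Spec_bfs n k (bfs n k)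

-- ===== LEMMAS AND PROOFS =====

-- pure list-level description of one conditional-enqueue pass over a candidate list
def exp1 (cs : List (Int × Int)) (vis : Array Int) : Array Int × List (Int × Int) :=
  match cs with
  | [] => (vis, [])
  | c :: cs =>
    if isMove c.1 c.2 vis then
      let r := exp1 cs (setv vis c.1 c.2)
      (r.1, c :: r.2)
    else exp1 cs vis

-- expanding a whole level
def expL (front : List (Int × Int)) (vis : Array Int) : Array Int × List (Int × Int) :=
  match front with
  | [] => (vis, [])
  | p :: r =>
    let a := exp1 (cands p.1 p.2) vis
    let b := expL r a.1
    (b.1, a.2 ++ b.2)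

-- list-level version of A's loop
def goL (k : Int) : Nat → List (Int × Int) → Array Int → Option Int
  | _, [], _ => none
  | 0, _, _ => none
  | f + 1, p :: qs, vis =>
    if p.1 = k then some p.2
    else
      let e := exp1 (cands p.1 p.2) vis
      goL k f (qs ++ e.2) e.1

-- list-level version of B's loop
def goLB (k : Int) : Nat → List (Int × Int) → Array Int → Option Int
  | _, [], _ => none
  | 0, _, _ => none
  | f + 1, front, vis =>
    match scanB k front with
    | some t => some t
    | none => goLB k f (expL front vis).2 (expL front vis).1

-- the decreasing measure on the visited array
def Mv (vis : Array Int) : Nat := (vis.toList.map Int.toNat).sum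


theorem goL_nil (k : Int) (f : Nat) (vis : Array Int) : goL k f [] vis = none := by
  cases f <;> rfl

theorem goL_zero (k : Int) (l : List (Int × Int)) (vis : Array Int) : goL k 0 l vis = none := by
  cases l <;> rfl

theorem goL_cons (k : Int) (f : Nat) (p : Int × Int) (qs : List (Int × Int)) (vis : Array Int) :
    goL k (f + 1) (p :: qs) vis =
      if p.1 = k then some p.2
      else goL k f (qs ++ (exp1 (cands p.1 p.2) vis).2) (exp1 (cands p.1 p.2) vis).1 := rfl

theorem goLB_nil (k : Int) (f : Nat) (vis : Array Int) : goLB k f [] vis = none := by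
  cases f <;> rfl

theorem goLB_zero (k : Int) (l : List (Int × Int)) (vis : Array Int) : goLB k 0 l vis = none := by
  cases l <;> rfl

theorem goLB_cons (k : Int) (f : Nat) (p : Int × Int) (fr : List (Int × Int)) (vis : Array Int) :
    goLB k (f + 1) (p :: fr) vis =
      match scanB k (p :: fr) with
      | some t => some t
      | none => goLB k f (expL (p :: fr) vis).2 (expL (p :: fr) vis).1 := rfl

theorem goB_nil (k : Int) (f : Nat) (vis : Array Int) : goB k f [] vis = none := by
  cases f <;> rfl

theorem goB_zero (k : Int) (l : List (Int × Int)) (vis : Array Int) : goB k 0 l vis = none := by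
  cases l <;> rfl

theorem foldl_push_toList (l : List (Int × Int)) : ∀ (a : Array (Int × Int)),
    (l.foldl (fun a p => a.push p) a).toList = a.toList ++ l := by
  induction l with
  | nil => simp
  | cons c r ih => intro a; simp [List.foldl]

theorem sum_map_set (l : List Int) (i : Nat) (v : Int) (h : i < l.length) :
    ((l.set i v).map Int.toNat).sum + (l[i]).toNat = (l.map Int.toNat).sum + v.toNat := by
  induction l generalizing i with
  | nil => simp at h
  | cons a l ih =>
    cases i with
    | zero => simp [List.set]; omega
    | succ j =>
      simp only [List.set, List.map, List.sum_cons, List.getElem_cons_succ]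
      have := ih j (by simpa using h)
      omega

theorem Mv_setv_lt (vis : Array Int) (x t : Int) (hs : vis.size = 100001)
    (hm : isMove x t vis = true) (ht0 : 0 ≤ t) :
    Mv (setv vis x t) + 1 ≤ Mv vis := by
  simp only [isMove, Bool.and_eq_true, decide_eq_true_eq] at hm
  obtain ⟨⟨hx0, hx1⟩, hlt⟩ := hm
  have hb : x.toNat < vis.size := by omega
  have hget : vis.getD x.toNat 0 = vis[x.toNat] := by
    simp [Array.getD, hb]
  have hb' : x.toNat < vis.toList.length := by simpa using hb
  have hsum := sum_map_set vis.toList x.toNat t hb'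
  have hgl : vis.toList[x.toNat] = vis[x.toNat] := Array.getElem_toList hb
  rw [hgl] at hsum
  rw [hget] at hlt
  simp only [Mv, setv, Array.toList_setIfInBounds]
  omega

theorem size_setv (vis : Array Int) (x t : Int) : (setv vis x t).size = vis.size := by
  simp [setv]

theorem size_exp1 (cs : List (Int × Int)) (vis : Array Int) :
    (exp1 cs vis).1.size = vis.size := by
  induction cs generalizing vis with
  | nil => simp [exp1]
  | cons c cs ih =>
    simp only [exp1]
    split
    · simp [ih, size_setv]
    · exact ih vis

theorem mem_exp1 (cs : List (Int × Int)) (vis : Array Int) (p : Int × Int)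
    (h : p ∈ (exp1 cs vis).2) : p ∈ cs := by
  induction cs generalizing vis with
  | nil => simp [exp1] at h
  | cons c cs ih =>
    simp only [exp1] at h
    split at h
    · simp only [List.mem_cons] at h
      rcases h with rfl | hh
      · exact List.mem_cons_self
      · exact List.mem_cons_of_mem _ (ih _ hh)
    · exact List.mem_cons_of_mem _ (ih _ h)

theorem dec_exp1 (cs : List (Int × Int)) (vis : Array Int) (hs : vis.size = 100001)
    (hcs : ∀ p ∈ cs, 0 ≤ p.2) :
    Mv (exp1 cs vis).1 + (exp1 cs vis).2.length ≤ Mv vis := by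
  induction cs generalizing vis with
  | nil => simp [exp1]
  | cons c cs ih =>
    simp only [exp1]
    split
    · rename_i hg
      have h1 := Mv_setv_lt vis c.1 c.2 hs hg (hcs c (List.mem_cons_self))
      have h2 := ih (setv vis c.1 c.2) (by simp [size_setv, hs])
        (fun p hp => hcs p (List.mem_cons_of_mem _ hp))
      simp only [List.length_cons]
      omega
    · exact ih vis hs (fun p hp => hcs p (List.mem_cons_of_mem _ hp))

theorem cands_nonneg (x t : Int) (ht : 0 ≤ t) : ∀ p ∈ cands x t, 0 ≤ p.2 := by
  intro p hp
  simp only [cands, List.mem_cons] at hp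
  rcases hp with h | h | h | h <;> first | (subst h; simp; omega) | simp at h

theorem size_expL (front : List (Int × Int)) (vis : Array Int) :
    (expL front vis).1.size = vis.size := by
  induction front generalizing vis with
  | nil => simp [expL]
  | cons p r ih => simp only [expL]; rw [ih, size_exp1]

theorem dec_expL (front : List (Int × Int)) (vis : Array Int) (hs : vis.size = 100001)
    (hf : ∀ p ∈ front, 0 ≤ p.2) :
    Mv (expL front vis).1 + (expL front vis).2.length ≤ Mv vis := by
  induction front generalizing vis with
  | nil => simp [expL]
  | cons p r ih =>
    simp only [expL, List.length_append]
    have h1 := dec_exp1 (cands p.1 p.2) vis hs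
      (cands_nonneg p.1 p.2 (hf p List.mem_cons_self))
    have h2 := ih (exp1 (cands p.1 p.2) vis).1 (by rw [size_exp1, hs])
      (fun q hq => hf q (List.mem_cons_of_mem _ hq))
    omega

theorem nonneg_expL (front : List (Int × Int)) (vis : Array Int)
    (hf : ∀ p ∈ front, 0 ≤ p.2) : ∀ p ∈ (expL front vis).2, 0 ≤ p.2 := by
  induction front generalizing vis with
  | nil => simp [expL]
  | cons q r ih =>
    intro p hp
    simp only [expL, List.mem_append] at hp
    rcases hp with hp | hp
    · exact cands_nonneg q.1 q.2 (hf q List.mem_cons_self) p (mem_exp1 _ _ _ hp)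
    · exact ih _ (fun a ha => hf a (List.mem_cons_of_mem _ ha)) p hp

-- one whole level of A's loop, described by scanB / expL
theorem levelA (k : Int) (cur : List (Int × Int)) :
    ∀ (nxt : List (Int × Int)) (vis : Array Int) (fa : Nat),
    vis.size = 100001 → (∀ p ∈ cur, 0 ≤ p.2) →
    Mv vis + cur.length + nxt.length ≤ fa →
    goL k fa (cur ++ nxt) vis =
      match scanB k cur with
      | some t => some t
      | none => goL k (fa - cur.length) (nxt ++ (expL cur vis).2) (expL cur vis).1 := by
  induction cur with
  | nil =>
    intro nxt vis fa _ _ _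
    simp [scanB, expL]
  | cons p cur ih =>
    intro nxt vis fa hs hinv hfuel
    have hMv : 0 ≤ Mv vis := Nat.zero_le _
    cases fa with
    | zero => simp [List.length_cons] at hfuel
    | succ f =>
      rw [List.cons_append, goL_cons]
      by_cases hk : p.1 = k
      · simp [scanB, hk]
      · rw [if_neg hk]
        have hcn := cands_nonneg p.1 p.2 (hinv p List.mem_cons_self)
        have hd1 := dec_exp1 (cands p.1 p.2) vis hs hcn
        have hrw : cur ++ nxt ++ (exp1 (cands p.1 p.2) vis).2
            = cur ++ (nxt ++ (exp1 (cands p.1 p.2) vis).2) := by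
          rw [List.append_assoc]
        rw [hrw]
        have := ih (nxt ++ (exp1 (cands p.1 p.2) vis).2) (exp1 (cands p.1 p.2) vis).1 f
          (by rw [size_exp1, hs])
          (fun q hq => hinv q (List.mem_cons_of_mem _ hq))
          (by simp only [List.length_cons] at hfuel; simp only [List.length_append]; omega)
        rw [this]
        simp only [scanB, if_neg hk]
        cases hsc : scanB k cur with
        | some t => rfl
        | none =>
          simp only [expL]
          congr 1
          · simp only [List.length_cons]; omega
          · rw [List.append_assoc]

-- the two list-level loops agree
theorem mainEq (k : Int) : ∀ (N : Nat) (front : List (Int × Int)) (vis : Array Int) (fa fb : Nat),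
    vis.size = 100001 → (∀ p ∈ front, 0 ≤ p.2) →
    Mv vis + front.length ≤ N → Mv vis + front.length ≤ fa → Mv vis + front.length ≤ fb →
    goL k fa front vis = goLB k fb front vis := by
  intro N
  induction N with
  | zero =>
    intro front vis fa fb _ _ hN _ _
    cases front with
    | nil => rw [goL_nil, goLB_nil]
    | cons p r => simp [List.length_cons] at hN
  | succ N ih =>
    intro front vis fa fb hs hinv hN hfa hfb
    cases front with
    | nil => rw [goL_nil, goLB_nil]
    | cons p r =>
      have hlen : 1 ≤ (p :: r).length := by simp
      cases fb with
      | zero => simp [List.length_cons] at hfb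
      | succ fb' =>
        have hL := levelA k (p :: r) [] vis fa hs hinv (by simpa using hfa)
        rw [List.append_nil] at hL
        rw [hL, goLB_cons]
        cases hsc : scanB k (p :: r) with
        | some t => rfl
        | none =>
          simp only []
          have hdec := dec_expL (p :: r) vis hs hinv
          rw [List.nil_append]
          exact ih (expL (p :: r) vis).2 (expL (p :: r) vis).1 (fa - (p :: r).length) fb'
            (by rw [size_expL, hs])
            (nonneg_expL (p :: r) vis hinv)
            (by simp only [List.length_cons] at *; omega)
            (by simp only [List.length_cons] at *; omega)
            (by simp only [List.length_cons] at *; omega)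

-- A's in-place step equals the pure exp1 pass over its candidate list
theorem stepA_eq (nx nt : Int) (q : Array (Int × Int)) (vis : Array Int) :
    ([(-1 : Int), 1].foldl (fun s dx =>
        if isMove (nx + dx) (nt + 1) s.2 then (s.1.push (nx + dx, nt + 1), setv s.2 (nx + dx) (nt + 1))
        else s)
      (if isMove (nx * 2) nt vis then (q.push (nx * 2, nt), setv vis (nx * 2) nt) else (q, vis)))
    = ((exp1 (cands nx nt) vis).2.foldl (fun a p => a.push p) q, (exp1 (cands nx nt) vis).1) := by
  have h1 : (nx + (-1 : Int)) = nx - 1 := by ring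
  simp only [List.foldl, cands, exp1, h1]
  split_ifs <;> simp [List.foldl]

theorem absA (k : Int) : ∀ (f : Nat) (q : Array (Int × Int)) (i : Nat) (vis : Array Int),
    goA k f q i vis = goL k f (q.toList.drop i) vis := by
  intro f
  induction f with
  | zero => intro q i vis; rw [goL_zero]; rfl
  | succ f ih =>
    intro q i vis
    by_cases h : i < q.size
    · have hlt : i < q.toList.length := by simpa using h
      have hd : q.toList.drop i = q[i] :: q.toList.drop (i + 1) := by
        rw [List.drop_eq_getElem_cons hlt, Array.getElem_toList]
      rw [hd, goL_cons]
      simp only [goA, dif_pos h]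
      by_cases hk : (q[i]).1 = k
      · rw [if_pos hk, if_pos hk]
      · rw [if_neg hk, if_neg hk]
        rw [stepA_eq (q[i]).1 (q[i]).2 q vis]
        rw [ih]
        rw [foldl_push_toList]
        rw [List.drop_append_of_le_length (by simpa using h)]
    · have hd : q.toList.drop i = [] := by
        apply List.drop_eq_nil_of_le
        simpa using Nat.le_of_not_lt h
      rw [hd, goL_nil]
      simp only [goA, dif_neg h]

theorem foldB_inner (cs : List (Int × Int)) :
    ∀ (v : Array Int) (acc : Array (Int × Int)),
    cs.foldl stepB (v, acc) = ((exp1 cs v).1, (exp1 cs v).2.foldl (fun a p => a.push p) acc) := by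
  induction cs with
  | nil => intro v acc; simp [exp1]
  | cons c r ih =>
    intro v acc
    simp only [List.foldl, exp1, stepB]
    split
    · rw [ih]; simp [List.foldl]
    · rw [ih]

theorem foldB_level (front : List (Int × Int)) :
    ∀ (v : Array Int) (acc : Array (Int × Int)),
    front.foldl nodeB (v, acc) = ((expL front v).1, (expL front v).2.foldl (fun a p => a.push p) acc) := by
  induction front with
  | nil => intro v acc; simp [expL]
  | cons p r ih =>
    intro v acc
    simp only [List.foldl, expL, nodeB]
    rw [foldB_inner, ih, List.foldl_append]

theorem absB (k : Int) : ∀ (f : Nat) (front : List (Int × Int)) (vis : Array Int),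
    goB k f front vis = goLB k f front vis := by
  intro f
  induction f with
  | zero => intro front vis; rw [goB_zero, goLB_zero]
  | succ f ih =>
    intro front vis
    cases front with
    | nil => rw [goB_nil, goLB_nil]
    | cons p r =>
      show (match scanB k (p :: r) with
        | some t => some t
        | none =>
          let s := (p :: r).foldl nodeB (vis, #[])
          goB k f s.2.toList s.1) = _
      rw [goLB_cons]
      cases hsc : scanB k (p :: r) with
      | some t => rfl
      | none =>
        simp only [foldB_level, foldl_push_toList]
        simp only [List.nil_append]
        exact ih _ _

theorem Mv_init (i : Nat) :
    Mv ((Array.replicate 100001 ((10 : Int) ^ 9)).setIfInBounds i 0) ≤ 100001 * 10 ^ 9 := by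
  have hrep : Mv (Array.replicate 100001 ((10 : Int) ^ 9)) = 100001 * 10 ^ 9 := by
    rw [Mv, Array.toList_replicate, List.map_replicate, List.sum_replicate, smul_eq_mul]
    have : ((1000000000 : Int)).toNat = 1000000000 := rfl
    norm_num [this]
  by_cases h : i < 100001
  · have h' : i < (Array.replicate 100001 ((10 : Int) ^ 9)).toList.length := by
      rw [Array.toList_replicate, List.length_replicate]; exact h
    have := sum_map_set (Array.replicate 100001 ((10 : Int) ^ 9)).toList i 0 h'
    simp only [Mv, Array.toList_setIfInBounds] at *
    omega
  · have : (Array.replicate 100001 ((10 : Int) ^ 9)).toList.set i 0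
        = (Array.replicate 100001 ((10 : Int) ^ 9)).toList := by
      apply List.set_eq_of_length_le
      rw [Array.toList_replicate, List.length_replicate]; omega
    simp only [Mv, Array.toList_setIfInBounds, this]
    simp only [Mv] at hrep
    omega

-- ===== VERDICT (by name: the statement is the Claim_ definition above) =====
theorem bfs_spec : Claim_equal_bfs := by
  intro n k _ _
  unfold Spec_bfs bfs bfs_alt
  cases h : pvIdx 100001 n with
  | none => rfl
  | some i =>
    simp only []
    rw [absA, absB]
    have htl : (#[((n : Int), (0 : Int))]).toList.drop 0 = [(n, 0)] := rfl
    rw [htl]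
    apply mainEq k (Mv ((Array.replicate 100001 ((10 : Int) ^ 9)).setIfInBounds i 0) + 1)
    · simp [Array.size_setIfInBounds, Array.size_replicate]
    · intro p hp
      simp only [List.mem_singleton] at hp
      subst hp
      exact le_refl 0
    · simp
    · have := Mv_init i
      have h2 : (100001 * 10 ^ 9 : Nat) + 1 ≤ 10 ^ 16 := by norm_num
      simp only [List.length_cons, List.length_nil]
      omega
    · have := Mv_init i
      have h2 : (100001 * 10 ^ 9 : Nat) + 1 ≤ 10 ^ 16 := by norm_num
      simp only [List.length_cons, List.length_nil]
      omega
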